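-- pv_equiv track=rewrite | github.com/svaningelgem/smartschool | src/smartschool/common.py | parse_mime_type
-- ===== SOURCE A (Python) =====
-- def parse_mime_type(file_type_string: str) -> str:
--     """Parse MIME type string to a standard format."""
--     current = file_type_string.lower().strip().replace("-", " ")
--
--     prev = None
--     while current != prev:
--         prev = current
--         for extra in {"file", "bestand", "document", "fichier"}:
--             current = current.removesuffix(extra).strip()
--
--     return current
-- ===== SOURCE B (Python) =====
-- def parse_mime_type(file_type_string: str) -> str:
--     """Parse MIME type string to a standard format."""
--     current = file_type_string.lower().strip().replace("-", " ")
--     end = len(current)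
--     while True:
--         j = end
--         while j > 0 and current[j - 1].isspace():
--             j -= 1
--         for w in ("file", "bestand", "document", "fichier"):
--             if j >= len(w) and current.startswith(w, j - len(w), j):
--                 end = j - len(w)
--                 break
--         else:
--             return current[:end].strip()
-- ===== Notes on version B (the rewrite author's own statement) =====
-- stated objective: faster
-- what changed: A's fixpoint while-loop, which rebuilds the whole string with removesuffix+strip on every pass, is replaced by a single backward index scan that peels the maximal trailing run of filler words in place and slices once at the end.
import Mathlib
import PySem

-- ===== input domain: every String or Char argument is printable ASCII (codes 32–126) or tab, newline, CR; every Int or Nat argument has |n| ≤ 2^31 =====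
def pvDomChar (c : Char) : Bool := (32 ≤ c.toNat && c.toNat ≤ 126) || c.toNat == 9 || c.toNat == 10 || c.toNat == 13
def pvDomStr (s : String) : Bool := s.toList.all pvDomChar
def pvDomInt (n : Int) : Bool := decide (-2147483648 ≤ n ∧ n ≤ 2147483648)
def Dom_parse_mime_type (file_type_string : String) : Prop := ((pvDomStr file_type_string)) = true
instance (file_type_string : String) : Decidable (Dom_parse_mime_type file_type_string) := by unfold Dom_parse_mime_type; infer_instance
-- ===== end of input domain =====

-- B replaces A's fixpoint while-loop (which rebuilds the whole string with removesuffix+strip on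
-- every pass) by one backward index scan that peels the trailing run of filler words in place.

-- ===== PORT A =====
-- exact char-level port of str.removesuffix: s[:len(s)-len(x)] if s ends with x, else s unchanged
def pvRemovesuffixA (s w : List Char) : List Char :=
  if PySem.Chars.endswith s w then s.take (s.length - w.length) else s

-- the set literal {"file","bestand","document","fichier"} in one fixed enumeration; A's while
-- loop runs the passes to a fixpoint, so the set's (hash-dependent) iteration order cannot
-- affect the returned value
def pvFillersA : List (List Char) := ["file".toList, "bestand".toList, "document".toList, "fichier".toList]

-- one execution of A's inner 'for extra in {...}: current = current.removesuffix(extra).strip()'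
def pvPassA (c : List Char) : List Char :=
  pvFillersA.foldl (fun cur w => PySem.Chars.strip (pvRemovesuffixA cur w)) c

-- A's 'while current != prev' loop; fuel c.length+1 always suffices because a non-fixpoint
-- pass strictly shortens the string (proved below), so the port equals the Python loop
def pvLoopA : Nat → List Char → List Char
  | 0, c => c
  | n+1, c => if pvPassA c = c then c else pvLoopA n (pvPassA c)

def parse_mime_type (file_type_string : String) : String :=
  let current := PySem.Chars.replace (PySem.Chars.strip (PySem.Chars.lower file_type_string.toList)) "-".toList " ".toList
  String.ofList (pvLoopA (current.length + 1) current)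

-- ===== PORT B =====
def pvFillersB : List (List Char) := ["file".toList, "bestand".toList, "document".toList, "fichier".toList]

-- B's inner 'while j > 0 and current[j-1].isspace(): j -= 1'; on reachable states the index is
-- always in range, the Option.elim false only keeps the definition total
def pvSkipWs (c : List Char) : Nat → Nat
  | 0 => 0
  | j+1 => if ((getElem? c j).elim false PySem.Chars.isspace) then pvSkipWs c j else j+1

-- B's 'for w in (...): if j >= len(w) and current.startswith(w, j - len(w), j)' for-break-else;
-- startswith(w, j-len(w), j) is exactly current[j-len(w):j] == w, i.e. w against the drop/take slice
def pvFindFillB (c : List Char) (j : Nat) : Option (List Char) :=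
  pvFillersB.find? (fun w => w.length ≤ j && PySem.Chars.startswith ((c.take j).drop (j - w.length)) w)

-- B's outer 'while True' loop over the end index; fuel e+1 suffices since e strictly decreases
def pvLoopB (c : List Char) : Nat → Nat → Nat
  | 0, e => e
  | n+1, e =>
    match pvFindFillB c (pvSkipWs c e) with
    | some w => pvLoopB c n (pvSkipWs c e - w.length)
    | none => e

def parse_mime_type_alt (file_type_string : String) : String :=
  let current := PySem.Chars.replace (PySem.Chars.strip (PySem.Chars.lower file_type_string.toList)) "-".toList " ".toList
  let e := pvLoopB current (current.length + 1) current.length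
  String.ofList (PySem.Chars.strip (current.take e))

-- ===== PRECONDITION & SPEC =====
def Spec_parse_mime_type (file_type_string : String) (out : String) : Prop := out = parse_mime_type_alt file_type_string
instance (file_type_string : String) (out : String) : Decidable (Spec_parse_mime_type file_type_string out) := by unfold Spec_parse_mime_type; infer_instance

-- ===== CLAIM (what is proved, stated in full; the proofs are below) =====
def Claim_equal_parse_mime_type : Prop := ∀ (file_type_string : String), Dom_parse_mime_type file_type_string → Spec_parse_mime_type file_type_string (parse_mime_type file_type_string)

-- ===== LEMMAS AND PROOFS =====

-- basic facts about rstrip / lstrip -------------------------------------------------------------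

theorem pv_rstrip_prefix (s : List Char) : PySem.Chars.rstrip s <+: s := by
  have h := List.dropWhile_suffix (l := s.reverse) PySem.Chars.isspace
  have h2 : (List.dropWhile PySem.Chars.isspace s.reverse).reverse <+: s.reverse.reverse :=
    List.reverse_prefix.mpr (by simpa using h)
  simpa [PySem.Chars.rstrip] using h2

theorem pv_rstrip_length_le (s : List Char) : (PySem.Chars.rstrip s).length ≤ s.length :=
  (pv_rstrip_prefix s).length_le

theorem pv_lstrip_suffix (s : List Char) : PySem.Chars.lstrip s <:+ s :=
  List.dropWhile_suffix _

theorem pv_rstrip_append_space {a : Char} (s : List Char) (h : PySem.Chars.isspace a = true) :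
    PySem.Chars.rstrip (s ++ [a]) = PySem.Chars.rstrip s := by
  simp [PySem.Chars.rstrip, h]

theorem pv_rstrip_append_nonspace {a : Char} (s : List Char) (h : PySem.Chars.isspace a = false) :
    PySem.Chars.rstrip (s ++ [a]) = s ++ [a] := by
  simp [PySem.Chars.rstrip, h]

theorem pv_rstrip_eq_self_of_suffix {w s : List Char} (hw : w ≠ [])
    (hl : PySem.Chars.isspace (w.getLast hw) = false) (h : w <:+ s) :
    PySem.Chars.rstrip s = s := by
  obtain ⟨t, rfl⟩ := h
  have hw2 : w = w.dropLast ++ [w.getLast hw] := (List.dropLast_append_getLast hw).symm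
  rw [hw2, ← List.append_assoc]
  exact pv_rstrip_append_nonspace _ hl

theorem pv_rstrip_idem (s : List Char) :
    PySem.Chars.rstrip (PySem.Chars.rstrip s) = PySem.Chars.rstrip s := by
  simp [PySem.Chars.rstrip, List.dropWhile_idempotent]

theorem pv_lstrip_eq_self_of_head {s : List Char}
    (h : ∀ a, s.head? = some a → PySem.Chars.isspace a = false) :
    PySem.Chars.lstrip s = s := by
  cases s with
  | nil => rfl
  | cons a t =>
    have ha : PySem.Chars.isspace a = false := h a rfl
    simp [PySem.Chars.lstrip, ha]

theorem pv_lstrip_append_spaces {u t : List Char}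
    (hu : ∀ a ∈ u, PySem.Chars.isspace a = true) :
    PySem.Chars.lstrip (u ++ t) = PySem.Chars.lstrip t := by
  induction u with
  | nil => rfl
  | cons a u ih =>
    simp only [List.cons_append, PySem.Chars.lstrip, List.dropWhile_cons, hu a (by simp), if_true]
    exact ih (fun x hx => hu x (by simp [hx]))

-- strip strips both ends, in either order
theorem pv_strip_eq (s : List Char) :
    PySem.Chars.strip s = PySem.Chars.lstrip (PySem.Chars.rstrip s) := by
  have hdecomp : List.takeWhile PySem.Chars.isspace s ++ List.dropWhile PySem.Chars.isspace s = s :=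
    List.takeWhile_append_dropWhile
  set u := List.takeWhile PySem.Chars.isspace s with hu
  set d := List.dropWhile PySem.Chars.isspace s with hd
  have hus : ∀ a ∈ u, PySem.Chars.isspace a = true := fun a ha => List.mem_takeWhile_imp ha
  have hls : PySem.Chars.lstrip s = d := rfl
  by_cases hE : List.dropWhile PySem.Chars.isspace d.reverse = []
  · have h1 : PySem.Chars.rstrip d = [] := by simp [PySem.Chars.rstrip, hE]
    have h2 : PySem.Chars.rstrip s = PySem.Chars.rstrip u := by
      rw [← hdecomp]
      simp only [PySem.Chars.rstrip, List.reverse_append, List.dropWhile_append, hE]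
      simp
    have h3 : PySem.Chars.rstrip u = [] := by
      simp only [PySem.Chars.rstrip]
      rw [List.dropWhile_eq_nil_iff.mpr (by intro x hx; exact hus x (by simpa using hx))]
      rfl
    calc PySem.Chars.strip s = PySem.Chars.rstrip d := by rw [PySem.Chars.strip, hls]
      _ = [] := h1
      _ = PySem.Chars.lstrip (PySem.Chars.rstrip s) := by rw [h2, h3]; rfl
  · have h1 : PySem.Chars.rstrip s = u ++ PySem.Chars.rstrip d := by
      rw [← hdecomp]
      simp only [PySem.Chars.rstrip, List.reverse_append, List.dropWhile_append]
      simp [hE]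
    have hpre : PySem.Chars.rstrip d <+: d := pv_rstrip_prefix d
    have hhead : ∀ a, (PySem.Chars.rstrip d).head? = some a → PySem.Chars.isspace a = false := by
      intro a ha
      obtain ⟨t, ht⟩ := hpre
      have hda : d.head? = some a := by
        rw [← ht, List.head?_append, ha]; rfl
      have hdne : d ≠ [] := by intro hnil; rw [hnil] at hda; simp at hda
      have : a = d.head hdne := by
        have := List.head?_eq_some_head (l := d) hdne
        rw [hda] at this; exact (Option.some_injective _ this)
      rw [this]
      exact List.head_dropWhile_not PySem.Chars.isspace hdne
    have h2 : PySem.Chars.lstrip (PySem.Chars.rstrip d) = PySem.Chars.rstrip d :=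
      pv_lstrip_eq_self_of_head hhead
    rw [PySem.Chars.strip, hls, h1, pv_lstrip_append_spaces hus, h2]

theorem pv_strip_length_le (s : List Char) : (PySem.Chars.strip s).length ≤ s.length := by
  rw [pv_strip_eq]
  calc (PySem.Chars.lstrip (PySem.Chars.rstrip s)).length
      ≤ (PySem.Chars.rstrip s).length := (pv_lstrip_suffix _).length_le
    _ ≤ s.length := (pv_rstrip_prefix s).length_le

theorem pv_strip_eq_self_of_length (s : List Char)
    (h : (PySem.Chars.strip s).length = s.length) : PySem.Chars.strip s = s := by
  rw [pv_strip_eq] at h ⊢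
  have h1 : (PySem.Chars.lstrip (PySem.Chars.rstrip s)).length ≤ (PySem.Chars.rstrip s).length :=
    (pv_lstrip_suffix _).length_le
  have h2 : (PySem.Chars.rstrip s).length ≤ s.length := (pv_rstrip_prefix s).length_le
  have hr : PySem.Chars.rstrip s = s := (pv_rstrip_prefix s).eq_of_length (by omega)
  rw [hr] at h ⊢
  exact (pv_lstrip_suffix s).eq_of_length h

-- facts about the filler words ------------------------------------------------------------------

-- the filler set written out as character lists
theorem pvFillersA_eq : pvFillersA =
    [['f','i','l','e'], ['b','e','s','t','a','n','d'],
     ['d','o','c','u','m','e','n','t'], ['f','i','c','h','i','e','r']] := rfl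

theorem pv_fillers_nonempty {w : List Char} (hw : w ∈ pvFillersA) : w ≠ [] := by
  rw [pvFillersA_eq] at hw
  simp only [List.mem_cons, List.not_mem_nil, or_false] at hw
  rcases hw with rfl | rfl | rfl | rfl <;> decide

theorem pv_fillers_nonspace {w : List Char} (hw : w ∈ pvFillersA) :
    ∀ a ∈ w, PySem.Chars.isspace a = false := by
  rw [pvFillersA_eq] at hw
  simp only [List.mem_cons, List.not_mem_nil, or_false] at hw
  have key : w.all (fun a => !PySem.Chars.isspace a) = true := by
    rcases hw with rfl | rfl | rfl | rfl <;> decide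
  intro a ha
  simpa using List.all_eq_true.mp key a ha

theorem pv_fillers_suffix_eq {w w' : List Char} (hw : w ∈ pvFillersA) (hw' : w' ∈ pvFillersA)
    (h : w <:+ w') : w = w' := by
  rw [pvFillersA_eq] at hw hw'
  simp only [List.mem_cons, List.not_mem_nil, or_false] at hw hw'
  rcases hw with rfl | rfl | rfl | rfl <;> rcases hw' with rfl | rfl | rfl | rfl <;>
    first
      | rfl
      | exact absurd (List.isSuffixOf_iff_suffix.mpr h) (by decide)

-- at most one filler can be a suffix of a given string
theorem pv_fillers_unique {w w' s : List Char} (hw : w ∈ pvFillersA) (hw' : w' ∈ pvFillersA)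
    (h : w <:+ s) (h' : w' <:+ s) : w = w' := by
  rcases List.suffix_or_suffix_of_suffix h h' with hh | hh
  · exact pv_fillers_suffix_eq hw hw' hh
  · exact (pv_fillers_suffix_eq hw' hw hh).symm

-- a filler is a suffix of s iff it is a suffix of lstrip s
theorem pv_suffix_lstrip_iff {w s : List Char} (hw : w ∈ pvFillersA) :
    (w <:+ PySem.Chars.lstrip s) ↔ (w <:+ s) := by
  constructor
  · intro h; exact h.trans (pv_lstrip_suffix s)
  · rintro ⟨a, rfl⟩
    show w <:+ List.dropWhile PySem.Chars.isspace (a ++ w)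
    rw [List.dropWhile_append]
    split
    · have hww : List.dropWhile PySem.Chars.isspace w = w := by
        apply pv_lstrip_eq_self_of_head
        intro x hx
        exact pv_fillers_nonspace hw x (List.mem_of_mem_head? hx)
      rw [hww]
    · exact List.suffix_append _ _

theorem pv_find?_congr {p q : List Char → Bool} {l : List (List Char)}
    (h : ∀ a ∈ l, p a = q a) : l.find? p = l.find? q := by
  induction l with
  | nil => rfl
  | cons a t ih =>
    simp only [List.find?_cons, h a (by simp)]
    split
    · rfl
    · exact ih (fun x hx => h x (by simp [hx]))

-- the common normal form: peel the maximal trailing run -----------------------------------------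

def pvPeel (c : List Char) : List Char :=
  match h : pvFillersA.find? (fun w => PySem.Chars.endswith (PySem.Chars.rstrip c) w) with
  | some w => pvPeel ((PySem.Chars.rstrip c).take ((PySem.Chars.rstrip c).length - w.length))
  | none => PySem.Chars.rstrip c
termination_by c.length
decreasing_by
  have hm := List.mem_of_find?_eq_some h
  have hp := List.find?_some h
  have hsuf : w <:+ PySem.Chars.rstrip c := by
    simpa [PySem.Chars.endswith, List.isSuffixOf_iff_suffix] using hp
  have hwne : w ≠ [] := pv_fillers_nonempty hm
  have hwlen : 1 ≤ w.length := List.length_pos_iff.mpr hwne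
  have hle : w.length ≤ (PySem.Chars.rstrip c).length := hsuf.length_le
  have := pv_rstrip_length_le c
  simp only [List.length_take]
  omega

theorem pvPeel_none {c : List Char}
    (h : pvFillersA.find? (fun w => PySem.Chars.endswith (PySem.Chars.rstrip c) w) = none) :
    pvPeel c = PySem.Chars.rstrip c := by
  rw [pvPeel.eq_def]
  split
  · next w h' => rw [h] at h'; cases h'
  · rfl

theorem pvPeel_some {c w : List Char}
    (h : pvFillersA.find? (fun w => PySem.Chars.endswith (PySem.Chars.rstrip c) w) = some w) :
    pvPeel c = pvPeel ((PySem.Chars.rstrip c).take ((PySem.Chars.rstrip c).length - w.length)) := by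
  rw [pvPeel.eq_def]
  split
  · next w' h' => rw [h] at h'; injection h' with hww; rw [hww]
  · next h' => rw [h] at h'; cases h' 

theorem pv_peel_rstrip (c : List Char) :
    pvPeel (PySem.Chars.rstrip c) = pvPeel c := by
  cases hf : pvFillersA.find? (fun w => PySem.Chars.endswith (PySem.Chars.rstrip c) w) with
  | none =>
    rw [pvPeel_none (c := PySem.Chars.rstrip c) (by rw [pv_rstrip_idem]; exact hf),
        pvPeel_none hf, pv_rstrip_idem]
  | some w =>
    rw [pvPeel_some (c := PySem.Chars.rstrip c) (by rw [pv_rstrip_idem]; exact hf),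
        pvPeel_some hf, pv_rstrip_idem]

-- prefixes inherit head?
theorem pv_head?_prefix {l m : List Char} {a : Char} (h : l <+: m) (ha : l.head? = some a) :
    m.head? = some a := by
  obtain ⟨t, rfl⟩ := h
  rw [List.head?_append, ha]
  rfl

theorem pv_peel_lstrip (c : List Char) :
    pvPeel (PySem.Chars.lstrip c) = PySem.Chars.lstrip (pvPeel c) := by
  generalize hn : c.length = n
  induction n using Nat.strong_induction_on generalizing c with
  | _ n ih =>
  have hsc : PySem.Chars.rstrip (PySem.Chars.lstrip c) = PySem.Chars.lstrip (PySem.Chars.rstrip c) :=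
    pv_strip_eq c
  have hpred : ∀ w ∈ pvFillersA,
      PySem.Chars.endswith (PySem.Chars.rstrip (PySem.Chars.lstrip c)) w
        = PySem.Chars.endswith (PySem.Chars.rstrip c) w := by
    intro w hw
    rw [hsc]
    apply Bool.coe_iff_coe.mp
    simp only [PySem.Chars.endswith, List.isSuffixOf_iff_suffix]
    exact pv_suffix_lstrip_iff hw
  have hfind := pv_find?_congr (l := pvFillersA)
      (p := fun w => PySem.Chars.endswith (PySem.Chars.rstrip (PySem.Chars.lstrip c)) w)
      (q := fun w => PySem.Chars.endswith (PySem.Chars.rstrip c) w) hpred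
  cases hf : pvFillersA.find? (fun w => PySem.Chars.endswith (PySem.Chars.rstrip c) w) with
  | none =>
    rw [pvPeel_none (hfind.trans hf), pvPeel_none hf, hsc]
  | some w =>
    have hw : w ∈ pvFillersA := List.mem_of_find?_eq_some hf
    have hsuf : w <:+ PySem.Chars.rstrip c := by
      have := List.find?_some hf
      simpa [PySem.Chars.endswith, List.isSuffixOf_iff_suffix] using this
    have hwne : w ≠ [] := pv_fillers_nonempty hw
    have hwlen : 1 ≤ w.length := List.length_pos_iff.mpr hwne
    set y := PySem.Chars.rstrip c with hy
    set u := List.takeWhile PySem.Chars.isspace y with hu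
    set y0 := List.dropWhile PySem.Chars.isspace y with hy0
    have hdecomp : u ++ y0 = y := List.takeWhile_append_dropWhile
    have hy0l : PySem.Chars.lstrip y = y0 := rfl
    have hus : ∀ a ∈ u, PySem.Chars.isspace a = true := fun a ha => List.mem_takeWhile_imp ha
    have hsuf0 : w <:+ y0 := (pv_suffix_lstrip_iff hw).mpr hsuf
    have hwy0 : w.length ≤ y0.length := hsuf0.length_le
    have htake : y.take (y.length - w.length) = u ++ y0.take (y0.length - w.length) := by
      rw [← hdecomp, List.take_append, List.length_append]
      congr 1
      · apply List.take_of_length_le; omega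
      · congr 1; omega
    have hz : PySem.Chars.lstrip (y.take (y.length - w.length))
        = y0.take (y0.length - w.length) := by
      rw [htake, pv_lstrip_append_spaces hus]
      apply pv_lstrip_eq_self_of_head
      intro a ha
      have hy0ne : y0 ≠ [] := by
        intro hnil
        rw [hnil] at ha; simp at ha
      have hha : y0.head? = some a := pv_head?_prefix (List.take_prefix _ _) ha
      have : a = y0.head hy0ne := by
        have := List.head?_eq_some_head (l := y0) hy0ne
        rw [hha] at this; exact Option.some_injective _ this
      rw [this]
      exact List.head_dropWhile_not PySem.Chars.isspace hy0ne
    rw [pvPeel_some (hfind.trans hf), pvPeel_some hf]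
    have hylen : y.length ≤ c.length := pv_rstrip_length_le c
    have hwy : w.length ≤ y.length := hsuf.length_le
    have harglen : (y.take (y.length - w.length)).length < n := by
      simp only [List.length_take]
      omega
    rw [hsc, hy0l]
    calc pvPeel (y0.take (y0.length - w.length))
        = pvPeel (PySem.Chars.lstrip (y.take (y.length - w.length))) := by rw [hz]
      _ = PySem.Chars.lstrip (pvPeel (y.take (y.length - w.length))) :=
          ih _ harglen _ rfl

-- auxiliary: a unique satisfying element is what find? returns
theorem pv_find?_unique {p : List Char → Bool} {l : List (List Char)} {w : List Char}
    (hmem : w ∈ l) (hpw : p w = true) (huniq : ∀ w' ∈ l, p w' = true → w' = w) :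
    l.find? p = some w := by
  induction l with
  | nil => cases hmem
  | cons a t ih =>
    by_cases ha : p a = true
    · have : a = w := huniq a (by simp) ha
      rw [List.find?_cons_of_pos ha, this]
    · have haw : a ≠ w := by intro hh; rw [hh] at ha; exact ha hpw
      have hmem' : w ∈ t := by
        rcases List.mem_cons.mp hmem with rfl | hh
        · exact absurd rfl haw
        · exact hh
      rw [List.find?_cons_of_neg ha]
      exact ih hmem' (fun w' hw' hp => huniq w' (by simp [hw']) hp)

theorem pv_lstrip_idem (s : List Char) :
    PySem.Chars.lstrip (PySem.Chars.lstrip s) = PySem.Chars.lstrip s := by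
  simp [PySem.Chars.lstrip, List.dropWhile_idempotent]

-- one stage of A's pass preserves the normal form
theorem pv_stage_peel {w : List Char} (hw : w ∈ pvFillersA) (cur : List Char) :
    PySem.Chars.lstrip (pvPeel (PySem.Chars.strip (pvRemovesuffixA cur w)))
      = PySem.Chars.lstrip (pvPeel cur) := by
  have key : ∀ z : List Char,
      PySem.Chars.lstrip (pvPeel (PySem.Chars.strip z)) = PySem.Chars.lstrip (pvPeel z) := by
    intro z
    rw [pv_strip_eq, pv_peel_lstrip, pv_peel_rstrip, pv_lstrip_idem]
  by_cases hE : PySem.Chars.endswith cur w = true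
  · -- the filler is removed; pvPeel makes the very same step
    have hsuf : w <:+ cur := by
      simpa [PySem.Chars.endswith, List.isSuffixOf_iff_suffix] using hE
    have hwne : w ≠ [] := pv_fillers_nonempty hw
    have hlast : PySem.Chars.isspace (w.getLast hwne) = false :=
      pv_fillers_nonspace hw _ (List.getLast_mem hwne)
    have hr : PySem.Chars.rstrip cur = cur := pv_rstrip_eq_self_of_suffix hwne hlast hsuf
    have hfind : pvFillersA.find? (fun w' => PySem.Chars.endswith (PySem.Chars.rstrip cur) w')
        = some w := by
      apply pv_find?_unique hw
      · rw [hr]; exact hE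
      · intro w' hw' hp
        have hsuf' : w' <:+ cur := by
          rw [hr] at hp
          simpa [PySem.Chars.endswith, List.isSuffixOf_iff_suffix] using hp
        exact pv_fillers_unique hw' hw hsuf' hsuf
    have hpeel : pvPeel cur = pvPeel (cur.take (cur.length - w.length)) := by
      rw [pvPeel_some hfind, hr]
    rw [pvRemovesuffixA, if_pos hE, key, hpeel]
  · rw [pvRemovesuffixA, if_neg hE, key]

-- one stage never lengthens
theorem pv_stage_length (w cur : List Char) :
    (PySem.Chars.strip (pvRemovesuffixA cur w)).length ≤ cur.length := by
  rw [pvRemovesuffixA]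
  split
  · calc (PySem.Chars.strip (cur.take (cur.length - w.length))).length
        ≤ (cur.take (cur.length - w.length)).length := pv_strip_length_le _
      _ ≤ cur.length := by simp [List.length_take]
  · exact pv_strip_length_le cur

-- a stage of unchanged length is the identity, and then nothing was removed
theorem pv_stage_eq_of_length {w : List Char} (hw : w ∈ pvFillersA) (cur : List Char)
    (h : (PySem.Chars.strip (pvRemovesuffixA cur w)).length = cur.length) :
    PySem.Chars.strip (pvRemovesuffixA cur w) = cur := by
  have hwne : w ≠ [] := pv_fillers_nonempty hw
  have hwlen : 1 ≤ w.length := List.length_pos_iff.mpr hwne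
  rw [pvRemovesuffixA] at h ⊢
  by_cases hE : PySem.Chars.endswith cur w = true
  · exfalso
    have hsuf : w <:+ cur := by
      simpa [PySem.Chars.endswith, List.isSuffixOf_iff_suffix] using hE
    have hwc : w.length ≤ cur.length := hsuf.length_le
    rw [if_pos hE] at h
    have := pv_strip_length_le (cur.take (cur.length - w.length))
    simp only [List.length_take] at this h
    omega
  · rw [if_neg hE] at h ⊢
    exact pv_strip_eq_self_of_length cur h

-- a fixed stage means: nothing removed and the string already stripped
theorem pv_stage_fix {w : List Char} (hw : w ∈ pvFillersA) (cur : List Char)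
    (h : PySem.Chars.strip (pvRemovesuffixA cur w) = cur) :
    PySem.Chars.endswith cur w = false ∧ PySem.Chars.strip cur = cur := by
  have hwne : w ≠ [] := pv_fillers_nonempty hw
  have hwlen : 1 ≤ w.length := List.length_pos_iff.mpr hwne
  by_cases hE : PySem.Chars.endswith cur w = true
  · exfalso
    have hsuf : w <:+ cur := by
      simpa [PySem.Chars.endswith, List.isSuffixOf_iff_suffix] using hE
    have hwc : w.length ≤ cur.length := hsuf.length_le
    rw [pvRemovesuffixA, if_pos hE] at h
    have h2 := pv_strip_length_le (cur.take (cur.length - w.length))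
    have h3 : (PySem.Chars.strip (cur.take (cur.length - w.length))).length = cur.length := by
      rw [h]
    simp only [List.length_take] at h2 h3
    omega
  · rw [pvRemovesuffixA, if_neg hE] at h
    exact ⟨Bool.eq_false_iff.mpr hE, h⟩

-- the fold over any sublist of the fillers ------------------------------------------------------

theorem pv_foldl_stage_peel (l : List (List Char)) (hl : ∀ w ∈ l, w ∈ pvFillersA)
    (c : List Char) :
    PySem.Chars.lstrip (pvPeel
        (l.foldl (fun cur w => PySem.Chars.strip (pvRemovesuffixA cur w)) c))
      = PySem.Chars.lstrip (pvPeel c) := by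
  induction l generalizing c with
  | nil => rfl
  | cons a t ih =>
    rw [List.foldl_cons, ih (fun w hw => hl w (by simp [hw])),
      pv_stage_peel (hl a (by simp)) c]

theorem pv_foldl_stage_length (l : List (List Char)) (c : List Char) :
    (l.foldl (fun cur w => PySem.Chars.strip (pvRemovesuffixA cur w)) c).length ≤ c.length := by
  induction l generalizing c with
  | nil => simp
  | cons a t ih =>
    rw [List.foldl_cons]
    exact le_trans (ih _) (pv_stage_length a c)

theorem pv_foldl_stage_eq_of_length (l : List (List Char)) (hl : ∀ w ∈ l, w ∈ pvFillersA)
    (c : List Char)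
    (h : (l.foldl (fun cur w => PySem.Chars.strip (pvRemovesuffixA cur w)) c).length = c.length) :
    l.foldl (fun cur w => PySem.Chars.strip (pvRemovesuffixA cur w)) c = c := by
  induction l generalizing c with
  | nil => rfl
  | cons a t ih =>
    rw [List.foldl_cons] at h ⊢
    have h1 := pv_foldl_stage_length t (PySem.Chars.strip (pvRemovesuffixA c a))
    have h2 := pv_stage_length a c
    have hstage : PySem.Chars.strip (pvRemovesuffixA c a) = c :=
      pv_stage_eq_of_length (hl a (by simp)) c (by omega)
    rw [hstage] at h ⊢
    exact ih (fun w hw => hl w (by simp [hw])) c h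

theorem pv_foldl_stage_fix (l : List (List Char)) (hl : ∀ w ∈ l, w ∈ pvFillersA)
    (c : List Char)
    (h : l.foldl (fun cur w => PySem.Chars.strip (pvRemovesuffixA cur w)) c = c) :
    ∀ w ∈ l, PySem.Chars.strip (pvRemovesuffixA c w) = c := by
  induction l generalizing c with
  | nil => intro w hw; cases hw
  | cons a t ih =>
    rw [List.foldl_cons] at h
    have h1 := pv_foldl_stage_length t (PySem.Chars.strip (pvRemovesuffixA c a))
    have h2 := pv_stage_length a c
    have hlen : c.length ≤ (t.foldl (fun cur w => PySem.Chars.strip (pvRemovesuffixA cur w))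
        (PySem.Chars.strip (pvRemovesuffixA c a))).length := by
      rw [h]
    have hstage : PySem.Chars.strip (pvRemovesuffixA c a) = c :=
      pv_stage_eq_of_length (hl a (by simp)) c (by omega)
    rw [hstage] at h
    intro w hw
    rcases List.mem_cons.mp hw with rfl | hwt
    · exact hstage
    · exact ih (fun w' hw' => hl w' (by simp [hw'])) c h w hwt

theorem pv_pass_peel (c : List Char) :
    PySem.Chars.lstrip (pvPeel (pvPassA c)) = PySem.Chars.lstrip (pvPeel c) :=
  pv_foldl_stage_peel pvFillersA (fun _ hw => hw) c

theorem pv_pass_length_lt (c : List Char) (h : pvPassA c ≠ c) :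
    (pvPassA c).length < c.length := by
  have h1 := pv_foldl_stage_length pvFillersA c
  rcases Nat.lt_or_ge (pvPassA c).length c.length with hh | hh
  · exact hh
  · exact absurd (pv_foldl_stage_eq_of_length pvFillersA (fun _ hw => hw) c
      (by unfold pvPassA at *; omega)) h

theorem pv_pass_fix (c : List Char) (h : pvPassA c = c) :
    PySem.Chars.lstrip (pvPeel c) = c := by
  have hall := pv_foldl_stage_fix pvFillersA (fun _ hw => hw) c h
  have hfile : (("file".toList) : List Char) ∈ pvFillersA := by rw [pvFillersA_eq]; simp
  have hstrip : PySem.Chars.strip c = c :=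
    (pv_stage_fix hfile c (hall _ hfile)).2
  -- strip c = c forces lstrip c = c and rstrip c = c
  have hl1 : (PySem.Chars.lstrip c).length ≤ c.length := (pv_lstrip_suffix c).length_le
  have hl2 : (PySem.Chars.rstrip (PySem.Chars.lstrip c)).length ≤ (PySem.Chars.lstrip c).length :=
    pv_rstrip_length_le _
  have hsl : (PySem.Chars.strip c).length = c.length := by rw [hstrip]
  have hsl' : (PySem.Chars.rstrip (PySem.Chars.lstrip c)).length = (PySem.Chars.strip c).length := rfl
  have hlstrip : PySem.Chars.lstrip c = c := (pv_lstrip_suffix c).eq_of_length (by omega)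
  have hrstrip : PySem.Chars.rstrip c = c := by
    conv_lhs => rw [← hlstrip]
    rw [show PySem.Chars.rstrip (PySem.Chars.lstrip c) = PySem.Chars.strip c from rfl, hstrip]
  have hnone : pvFillersA.find? (fun w => PySem.Chars.endswith (PySem.Chars.rstrip c) w) = none := by
    rw [List.find?_eq_none]
    intro w hw
    have := (pv_stage_fix hw c (hall w hw)).1
    rw [hrstrip]
    simp [this]
  rw [pvPeel_none hnone, hrstrip, hlstrip]

-- A's loop computes the normal form
theorem pv_loopA_eq (n : Nat) (c : List Char) (h : c.length < n) :
    pvLoopA n c = PySem.Chars.lstrip (pvPeel c) := by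
  induction n generalizing c with
  | zero => omega
  | succ n ih =>
    rw [pvLoopA]
    by_cases hfix : pvPassA c = c
    · rw [if_pos hfix, pv_pass_fix c hfix]
    · rw [if_neg hfix, ih (pvPassA c) (by have := pv_pass_length_lt c hfix; omega),
        pv_pass_peel]

-- B-side lemmas ---------------------------------------------------------------------------------

theorem pv_skipWs_le (c : List Char) (e : Nat) : pvSkipWs c e ≤ e := by
  induction e with
  | zero => simp [pvSkipWs]
  | succ e ih =>
    rw [pvSkipWs]
    split
    · omega
    · exact le_refl _

theorem pv_take_skipWs (c : List Char) (e : Nat) (he : e ≤ c.length) :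
    c.take (pvSkipWs c e) = PySem.Chars.rstrip (c.take e) := by
  induction e with
  | zero => simp [pvSkipWs, PySem.Chars.rstrip]
  | succ e ih =>
    have helt : e < c.length := by omega
    have hsome : getElem? c e = some (getElem c e helt) := List.getElem?_eq_getElem helt
    have htake : c.take (e + 1) = c.take e ++ [getElem c e helt] := by
      rw [List.take_add_one, hsome]
      rfl
    rw [pvSkipWs]
    by_cases hsp : PySem.Chars.isspace (getElem c e helt) = true
    · rw [if_pos (by rw [hsome]; exact hsp), htake, pv_rstrip_append_space _ hsp]
      exact ih (by omega)
    · rw [if_neg (by rw [hsome]; simpa using hsp), htake,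
        pv_rstrip_append_nonspace _ (Bool.eq_false_iff.mpr hsp)]

theorem pvFillersB_eq_A : pvFillersB = pvFillersA := rfl

-- B's startswith-on-a-window test is exactly the endswith test on the prefix
theorem pv_findFillB_eq (c : List Char) (j : Nat) (hj : j ≤ c.length) :
    pvFindFillB c j = pvFillersA.find? (fun w => PySem.Chars.endswith (c.take j) w) := by
  rw [pvFindFillB, pvFillersB_eq_A]
  apply pv_find?_congr
  intro w _
  have hd : (c.take j).length = j := by simp [List.length_take]; omega
  by_cases hwj : w.length ≤ j
  · have hlen : ((c.take j).drop (j - w.length)).length = w.length := by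
      simp [List.length_drop, hd]; omega
    apply Bool.coe_iff_coe.mp
    simp only [Bool.and_eq_true, decide_eq_true_eq, PySem.Chars.startswith,
      PySem.Chars.endswith, List.isPrefixOf_iff_prefix, List.isSuffixOf_iff_suffix]
    constructor
    · rintro ⟨-, hpre⟩
      have heq : w = (c.take j).drop (j - w.length) := hpre.eq_of_length (by omega)
      rw [List.suffix_iff_eq_drop, hd]
      exact heq
    · intro hsuf
      refine ⟨hwj, ?_⟩
      have heq := List.suffix_iff_eq_drop.mp hsuf
      rw [hd] at heq
      exact heq ▸ List.prefix_rfl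

  · have h1 : (decide (w.length ≤ j) && PySem.Chars.startswith ((c.take j).drop (j - w.length)) w) = false := by
      simp [hwj]
    have h2 : PySem.Chars.endswith (c.take j) w = false := by
      apply Bool.eq_false_iff.mpr
      intro hE
      have hsuf : w <:+ c.take j := by
        simpa [PySem.Chars.endswith, List.isSuffixOf_iff_suffix] using hE
      have := hsuf.length_le
      omega
    rw [h1, h2]

-- B's loop computes the normal form
theorem pv_loopB_eq (c : List Char) (n e : Nat) (he : e ≤ c.length) (h : e < n) :
    PySem.Chars.strip (c.take (pvLoopB c n e)) = PySem.Chars.lstrip (pvPeel (c.take e)) := by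
  induction n generalizing e with
  | zero => omega
  | succ n ih =>
    have hj := pv_skipWs_le c e
    have hjtake := pv_take_skipWs c e he
    have hfind : pvFindFillB c (pvSkipWs c e)
        = pvFillersA.find? (fun w => PySem.Chars.endswith (PySem.Chars.rstrip (c.take e)) w) := by
      rw [pv_findFillB_eq c (pvSkipWs c e) (by omega), hjtake]
    rw [pvLoopB]
    cases hf : pvFillersA.find? (fun w => PySem.Chars.endswith (PySem.Chars.rstrip (c.take e)) w) with
    | none =>
      rw [hfind, hf, pvPeel_none hf, pv_strip_eq]
    | some w =>
      rw [hfind, hf]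
      have hw : w ∈ pvFillersA := List.mem_of_find?_eq_some hf
      have hp := List.find?_some hf
      have hsuf : w <:+ PySem.Chars.rstrip (c.take e) := by
        simpa [PySem.Chars.endswith, List.isSuffixOf_iff_suffix] using hp
      have hwne : w ≠ [] := pv_fillers_nonempty hw
      have hwlen : 1 ≤ w.length := List.length_pos_iff.mpr hwne
      have hwj : w.length ≤ pvSkipWs c e := by
        have := hsuf.length_le
        rw [← hjtake] at this
        simp only [List.length_take] at this
        omega
      have hargtake : (PySem.Chars.rstrip (c.take e)).take
            ((PySem.Chars.rstrip (c.take e)).length - w.length)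
          = c.take (pvSkipWs c e - w.length) := by
        rw [← hjtake, List.take_take, List.length_take]
        congr 1
        have : pvSkipWs c e ≤ c.length := by omega
        omega
      rw [pvPeel_some hf, hargtake]
      exact ih (pvSkipWs c e - w.length) (by omega) (by omega)

-- ===== VERDICT (by name: the statement is the Claim_ definition above) =====
theorem parse_mime_type_spec : Claim_equal_parse_mime_type := by
  intro s _
  unfold Spec_parse_mime_type parse_mime_type parse_mime_type_alt
  set c := PySem.Chars.replace (PySem.Chars.strip (PySem.Chars.lower s.toList)) "-".toList " ".toList with hc
  have hA := pv_loopA_eq (c.length + 1) c (by omega)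
  have hB := pv_loopB_eq c (c.length + 1) c.length le_rfl (by omega)
  simp only [List.take_length] at hB
  simp [hA, hB]
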